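-- pv_equiv track=rewrite | github.com/RovelMan/active-learning-framework | al_framework/engine/pred.py | get_diverse_set
-- ===== SOURCE A (Python) =====
-- def get_diverse_set(STRATEGY_IDS, SIM_SCORES):
--     # IDS = []
--     # for SIM in SIM_SCORES:
--     #     for STRAT_ID in STRATEGY_IDS:
--     #         if SIM[0] == STRAT_ID[0]+'.jpg':
--     #             if STRAT_ID not in IDS:
--     #                 IDS.append(STRAT_ID)
--     # IDS = sorted(IDS, key=lambda x: x[1], reverse=True)
--     NEW_IDS = []
--     last_id_index = 0
--     for SIM in SIM_SCORES:
--         for i in range(len(STRATEGY_IDS)):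
--             if SIM[0] == STRATEGY_IDS[i][0]+'.jpg':
--                 if STRATEGY_IDS[i] not in NEW_IDS:
--                     last_id_index = i
--                     NEW_IDS.append(STRATEGY_IDS[i])
--     NEW_IDS += STRATEGY_IDS[last_id_index+1:]
--     NEW_IDS = sorted(NEW_IDS, key=lambda x: x[1], reverse=True)
--     return NEW_IDS
-- ===== SOURCE B (Python) =====
-- def get_diverse_set(STRATEGY_IDS, SIM_SCORES):
--     # Index strategy ids by the filename they would match, once.
--     index = {}
--     for i, strat in enumerate(STRATEGY_IDS):
--         key = strat[0] + '.jpg'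
--         index[key] = index.get(key, []) + [(i, strat)]
--     seen = set()
--     NEW_IDS = []
--     last_id_index = 0
--     for SIM in SIM_SCORES:
--         for i, strat in index.get(SIM[0], []):
--             if strat not in seen:
--                 seen.add(strat)
--                 last_id_index = i
--                 NEW_IDS.append(strat)
--     NEW_IDS += STRATEGY_IDS[last_id_index+1:]
--     return sorted(NEW_IDS, key=lambda x: x[1], reverse=True)
-- ===== Notes on version B (the rewrite author's own statement) =====
-- stated objective: faster
-- what changed: Replaces the inner linear scan of STRATEGY_IDS for every similarity score by a dict keyed on filename built once, and the linear 'not in NEW_IDS' dedup check by a set, leaving a single pass over SIM_SCORES before the stable sort.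
import Mathlib
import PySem

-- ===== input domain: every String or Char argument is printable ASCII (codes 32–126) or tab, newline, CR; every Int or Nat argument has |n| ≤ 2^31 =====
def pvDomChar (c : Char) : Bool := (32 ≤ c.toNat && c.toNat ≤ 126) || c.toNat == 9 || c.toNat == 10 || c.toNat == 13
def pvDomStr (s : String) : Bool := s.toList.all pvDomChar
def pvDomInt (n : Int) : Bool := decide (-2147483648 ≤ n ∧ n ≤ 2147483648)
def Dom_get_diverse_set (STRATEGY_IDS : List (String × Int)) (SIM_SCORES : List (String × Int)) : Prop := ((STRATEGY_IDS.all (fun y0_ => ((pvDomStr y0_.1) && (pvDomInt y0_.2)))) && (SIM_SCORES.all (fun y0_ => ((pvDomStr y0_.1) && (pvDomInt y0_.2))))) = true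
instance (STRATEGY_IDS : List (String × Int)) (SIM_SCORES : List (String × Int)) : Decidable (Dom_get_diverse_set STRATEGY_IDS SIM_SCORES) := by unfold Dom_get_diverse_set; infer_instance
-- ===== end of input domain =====

-- B replaces A's per-score linear scan of STRATEGY_IDS by a dict index built once plus a set for
-- the dedup test (objective: faster, asymptotic).

-- ===== PORT A =====
def get_diverse_set (STRATEGY_IDS : List (String × Int)) (SIM_SCORES : List (String × Int)) : List (String × Int) :=
  let st := SIM_SCORES.foldl (fun (st : List (String × Int) × Int) sim =>
    (PySem.List.pyRange 0 (STRATEGY_IDS.length : Int) 1).foldl (fun st i =>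
      if sim.1 == (PySem.List.pyGetD STRATEGY_IDS i ("", 0)).1 ++ ".jpg" then
        if PySem.List.pyGetD STRATEGY_IDS i ("", 0) ∈ st.1 then st
        else (st.1 ++ [PySem.List.pyGetD STRATEGY_IDS i ("", 0)], i)
      else st) st) (([] : List (String × Int)), (0 : Int))
  PySem.List.sorted (st.1 ++ PySem.List.slice STRATEGY_IDS (some (st.2 + 1)) none) (fun x => x.2) true

-- ===== PORT B =====
def get_diverse_set_alt (STRATEGY_IDS : List (String × Int)) (SIM_SCORES : List (String × Int)) : List (String × Int) :=
  let index := (PySem.List.enumerate STRATEGY_IDS 0).foldl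
      (fun d p => PySem.Dict.modify d (p.2.1 ++ ".jpg") [] (fun v => v ++ [p]))
      (PySem.Dict.empty : PySem.Dict String (List (Int × (String × Int))))
  let st := SIM_SCORES.foldl (fun (st : PySem.Set (String × Int) × List (String × Int) × Int) sim =>
      (PySem.Dict.getD index sim.1 []).foldl (fun st p =>
        if p.2 ∈ st.1 then st
        else (PySem.Set.add st.1 p.2, st.2.1 ++ [p.2], p.1)) st)
      ((PySem.Set.empty : PySem.Set (String × Int)), ([] : List (String × Int)), (0 : Int))
  PySem.List.sorted (st.2.1 ++ PySem.List.slice STRATEGY_IDS (some (st.2.2 + 1)) none) (fun x => x.2) true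

-- ===== PRECONDITION & SPEC =====
def Spec_get_diverse_set (STRATEGY_IDS : List (String × Int)) (SIM_SCORES : List (String × Int)) (out : List (String × Int)) : Prop := out = get_diverse_set_alt STRATEGY_IDS SIM_SCORES
instance (STRATEGY_IDS : List (String × Int)) (SIM_SCORES : List (String × Int)) (out : List (String × Int)) : Decidable (Spec_get_diverse_set STRATEGY_IDS SIM_SCORES out) := by unfold Spec_get_diverse_set; infer_instance

-- ===== CLAIM (what is proved, stated in full; the proofs are below) =====
def Claim_equal_get_diverse_set : Prop := ∀ (STRATEGY_IDS : List (String × Int)) (SIM_SCORES : List (String × Int)), Dom_get_diverse_set STRATEGY_IDS SIM_SCORES → Spec_get_diverse_set STRATEGY_IDS SIM_SCORES (get_diverse_set STRATEGY_IDS SIM_SCORES)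

-- ===== LEMMAS AND PROOFS =====

-- The dict built by B maps a key to exactly the (index, entry) pairs of `enumerate` whose filename is that key.
theorem pv_index_getD (l : List (Int × (String × Int)))
    (d : PySem.Dict String (List (Int × (String × Int)))) (k : String) :
    PySem.Dict.getD (l.foldl (fun d p => PySem.Dict.modify d (p.2.1 ++ ".jpg") [] (fun v => v ++ [p])) d) k []
      = PySem.Dict.getD d k [] ++ l.filter (fun p => p.2.1 ++ ".jpg" == k) := by
  induction l generalizing d with
  | nil => simp
  | cons p l ih =>
    simp only [List.foldl_cons, List.filter_cons, ih]
    rw [PySem.Dict.getD_modify]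
    by_cases h : k = p.2.1 ++ ".jpg"
    · simp [h]
    · simp [h, Ne.symm h]

-- The relation B's loop state (seen-set, list, last index) bears to A's (list, last index).
def pvRel (sB : PySem.Set (String × Int) × List (String × Int) × Int)
    (sA : List (String × Int) × Int) : Prop :=
  sB.2.1 = sA.1 ∧ sB.2.2 = sA.2 ∧ ∀ x, x ∈ sB.1 ↔ x ∈ sA.1

theorem pv_inner (l : List (Int × (String × Int)))
    (sA : List (String × Int) × Int) (sB : PySem.Set (String × Int) × List (String × Int) × Int)
    (h : pvRel sB sA) :
    pvRel (l.foldl (fun st p =>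
        if p.2 ∈ st.1 then st
        else (PySem.Set.add st.1 p.2, st.2.1 ++ [p.2], p.1)) sB)
      (l.foldl (fun st p =>
        if p.2 ∈ st.1 then st
        else (st.1 ++ [p.2], p.1)) sA) := by
  induction l generalizing sA sB with
  | nil => exact h
  | cons p l ih =>
    obtain ⟨h1, h2, h3⟩ := h
    simp only [List.foldl_cons]
    by_cases hm : p.2 ∈ sA.1
    · rw [if_pos hm, if_pos ((h3 p.2).mpr hm)]
      exact ih _ _ ⟨h1, h2, h3⟩
    · rw [if_neg hm, if_neg (fun hc => hm ((h3 p.2).mp hc))]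
      refine ih _ _ ⟨by simp [h1], rfl, fun x => ?_⟩
      simp [PySem.Set.mem_add, h3 x]

theorem pv_outer (S : List (String × Int)) (SIM : List (String × Int))
    (sA : List (String × Int) × Int) (sB : PySem.Set (String × Int) × List (String × Int) × Int)
    (h : pvRel sB sA) :
    pvRel (SIM.foldl (fun st sim =>
        (PySem.Dict.getD ((PySem.List.enumerate S 0).foldl
            (fun d p => PySem.Dict.modify d (p.2.1 ++ ".jpg") [] (fun v => v ++ [p]))
            PySem.Dict.empty) sim.1 []).foldl (fun st p =>
          if p.2 ∈ st.1 then st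
          else (PySem.Set.add st.1 p.2, st.2.1 ++ [p.2], p.1)) st) sB)
      (SIM.foldl (fun st sim =>
        (PySem.List.pyRange 0 (S.length : Int) 1).foldl (fun st i =>
          if sim.1 == (PySem.List.pyGetD S i ("", 0)).1 ++ ".jpg" then
            if PySem.List.pyGetD S i ("", 0) ∈ st.1 then st
            else (st.1 ++ [PySem.List.pyGetD S i ("", 0)], i)
          else st) st) sA) := by
  induction SIM generalizing sA sB with
  | nil => exact h
  | cons sim SIM ih =>
    simp only [List.foldl_cons]
    refine ih _ _ ?_
    -- A's inner loop: index loop = loop over enumerate, then drop non-matching entries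
    have hA : (PySem.List.pyRange 0 (S.length : Int) 1).foldl (fun st i =>
          if sim.1 == (PySem.List.pyGetD S i ("", 0)).1 ++ ".jpg" then
            if PySem.List.pyGetD S i ("", 0) ∈ st.1 then st
            else (st.1 ++ [PySem.List.pyGetD S i ("", 0)], i)
          else st) sA
        = ((PySem.List.enumerate S 0).filter (fun p => p.2.1 ++ ".jpg" == sim.1)).foldl
            (fun st p => if p.2 ∈ st.1 then st else (st.1 ++ [p.2], p.1)) sA := by
      rw [← PySem.List.foldl_if_eq_foldl_filter,
          PySem.List.enumerate_eq_map_pyRange (d := ("", 0)), List.foldl_map]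
      simp only [PySem.List.len]
      refine PySem.List.foldl_congr_mem _ _ _ _ (fun st i _ => ?_)
      by_cases hc : sim.1 = (PySem.List.pyGetD S i ("", 0)).1 ++ ".jpg"
      · simp [hc]
      · simp [hc, Ne.symm hc]
    rw [hA, pv_index_getD, PySem.Dict.getD_empty, List.nil_append]
    exact pv_inner _ _ _ h

-- ===== VERDICT (by name: the statement is the Claim_ definition above) =====
theorem get_diverse_set_spec : Claim_equal_get_diverse_set := by
  intro S SIM _
  unfold Spec_get_diverse_set get_diverse_set get_diverse_set_alt
  dsimp only
  obtain ⟨h1, h2, -⟩ := pv_outer S SIM ([], 0) (PySem.Set.empty, [], 0)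
    ⟨rfl, rfl, by simp [PySem.Set.empty]⟩
  rw [← h1, ← h2]
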